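-- pv_equiv track=rewrite | github.com/pypi-data/pypi-mirror-398 | packages/consolemod/consolemod-0.2.0.tar.gz/consolemod-0.2.0/src/consolemod/utils/formatter.py | highlight_text
-- ===== SOURCE A (Python) =====
-- def highlight_text(text: str, search: str, color: str = "yellow") -> str:
--     """Highlight search term in text (simple version, thread-safe)
--
--     Args:
--         text: Text to highlight in
--         search: Term to highlight
--         color: Color for highlighting
--
--     Returns:
--         Text with highlighting markup
--     """
--     if not search or not text:
--         return text
--
--     # Simple case-insensitive highlighting
--     lower_text = text.lower()
--     lower_search = search.lower()
--     result = ""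
--     pos = 0
--
--     while True:
--         idx = lower_text.find(lower_search, pos)
--         if idx == -1:
--             result += text[pos:]
--             break
--
--         result += text[pos:idx]
--         result += f"[{color}]{text[idx:idx+len(search)]}[/{color}]"
--         pos = idx + len(search)
--
--     return result
-- ===== SOURCE B (Python) =====
-- def highlight_text(text: str, search: str, color: str = "yellow") -> str:
--     """Highlight search term in text (single left-to-right scan)."""
--     if not search or not text:
--         return text
--
--     lower_search = search.lower()
--     n = len(search)
--     parts = []
--     i = 0
--     while i < len(text):
--         chunk = text[i:i + n]
--         if chunk.lower() == lower_search:
--             parts.append(f"[{color}]{chunk}[/{color}]")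
--             i += n
--         else:
--             parts.append(text[i])
--             i += 1
--     return "".join(parts)
-- ===== Notes on version B (the rewrite author's own statement) =====
-- stated objective: alternative
-- what changed: Replaces the lowered-copy find()-and-index bookkeeping loop with a single left-to-right scan that tests a case-insensitive match at each position, emitting pieces into a list joined at the end.
import Mathlib
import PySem

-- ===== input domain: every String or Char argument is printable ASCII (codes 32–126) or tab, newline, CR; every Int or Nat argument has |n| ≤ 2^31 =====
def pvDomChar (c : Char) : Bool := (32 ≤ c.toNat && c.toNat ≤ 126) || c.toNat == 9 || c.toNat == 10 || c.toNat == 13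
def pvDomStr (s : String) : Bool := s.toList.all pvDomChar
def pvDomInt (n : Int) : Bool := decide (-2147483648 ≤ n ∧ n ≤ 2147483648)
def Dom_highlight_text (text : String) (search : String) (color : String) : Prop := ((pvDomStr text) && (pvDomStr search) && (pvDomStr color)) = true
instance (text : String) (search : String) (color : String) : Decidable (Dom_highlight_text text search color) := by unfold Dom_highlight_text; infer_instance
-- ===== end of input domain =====

-- B changes the algorithm, not the result: one left-to-right scan with a per-position
-- case-insensitive prefix test, instead of A's find() loop over a lowered copy (alternative; no speed claim).

-- ===== PORT A =====
-- A's while-True loop over positions; fuel only makes the recursion total (never exhausted: each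
-- iteration advances pos by len(search) ≥ 1, so text.length + 1 iterations suffice).
def hlA_loop (text ltext ls : List Char) (slen : Nat) (color : List Char) (fuel : Nat) (pos : Nat) : List Char :=
  match fuel with
  | 0 => PySem.Chars.slice text (some (pos : Int)) none
  | fuel + 1 =>
    let idx := PySem.Chars.findFrom ltext ls (pos : Int)
    if idx = -1 then
      PySem.Chars.slice text (some (pos : Int)) none
    else
      PySem.Chars.slice text (some (pos : Int)) (some idx)
        ++ ('[' :: color ++ [']'])
        ++ PySem.Chars.slice text (some idx) (some (idx + (slen : Int)))
        ++ ('[' :: '/' :: color ++ [']'])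
        ++ hlA_loop text ltext ls slen color fuel (idx.toNat + slen)

def highlight_text (text : String) (search : String) (color : String) : String :=
  if search = "" ∨ text = "" then text
  else
    String.ofList (hlA_loop text.toList (PySem.Chars.lower text.toList)
      (PySem.Chars.lower search.toList) search.toList.length color.toList
      (text.toList.length + 1) 0)

-- ===== PORT B =====
-- B's single scan: at each position try a case-insensitive match of the next n characters.
def hlB_loop (s : List Char) (ls : List Char) (n : Nat) (color : List Char) : List Char :=
  match s with
  | [] => []
  | c :: rest =>
    if PySem.Chars.lower ((c :: rest).take n) = ls then
      ('[' :: color ++ [']']) ++ (c :: rest).take n ++ ('[' :: '/' :: color ++ [']'])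
        ++ hlB_loop (rest.drop (n - 1)) ls n color
    else
      c :: hlB_loop rest ls n color
termination_by s.length
decreasing_by
  · simp only [List.length_drop, List.length_cons]; omega
  · simp only [List.length_cons]; omega

def highlight_text_alt (text : String) (search : String) (color : String) : String :=
  if search = "" ∨ text = "" then text
  else
    String.ofList (hlB_loop text.toList (PySem.Chars.lower search.toList)
      search.toList.length color.toList)

-- ===== PRECONDITION & SPEC =====
def Spec_highlight_text (text : String) (search : String) (color : String) (out : String) : Prop := out = highlight_text_alt text search color
instance (text : String) (search : String) (color : String) (out : String) : Decidable (Spec_highlight_text text search color out) := by unfold Spec_highlight_text; infer_instance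

-- ===== CLAIM (what is proved, stated in full; the proofs are below) =====
def Claim_equal_highlight_text : Prop := ∀ (text : String) (search : String) (color : String), Dom_highlight_text text search color → Spec_highlight_text text search color (highlight_text text search color)

-- ===== LEMMAS AND PROOFS =====

theorem lower_take (s : List Char) (n : Nat) :
    PySem.Chars.lower (s.take n) = (PySem.Chars.lower s).take n := by
  simp [PySem.Chars.lower, List.map_take]

theorem lower_drop (s : List Char) (n : Nat) :
    PySem.Chars.lower (s.drop n) = (PySem.Chars.lower s).drop n := by
  simp [PySem.Chars.lower, List.map_drop]

theorem length_lower (s : List Char) : (PySem.Chars.lower s).length = s.length := by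
  simp [PySem.Chars.lower]

-- the B-loop condition is exactly "ls is a prefix of the lowered suffix" (when ls has length n)
theorem hlB_cond_iff (s ls : List Char) (n : Nat) (hn : ls.length = n) :
    PySem.Chars.lower (s.take n) = ls ↔ ls <+: PySem.Chars.lower s := by
  rw [lower_take]
  constructor
  · intro h; rw [← h]; exact List.take_prefix _ _
  · intro h
    rw [← hn]
    exact (List.prefix_iff_eq_take.mp h).symm

theorem hlB_nomatch (s ls : List Char) (n : Nat) (color : List Char) (hn : ls.length = n)
    (h : ¬ ls <:+: PySem.Chars.lower s) :
    hlB_loop s ls n color = s := by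
  induction s with
  | nil => simp [hlB_loop]
  | cons c rest ih =>
    have hcons : PySem.Chars.lower (c :: rest)
        = PySem.Chars.lowerChar c :: PySem.Chars.lower rest := by
      simp [PySem.Chars.lower]
    rw [hlB_loop, if_neg]
    · rw [ih (fun hi => h (hcons ▸ List.infix_cons hi))]
    · intro hc
      exact h ((hlB_cond_iff _ _ _ hn |>.mp hc).isInfix)

theorem hlB_skip (ls : List Char) (n : Nat) (color : List Char) (hn : ls.length = n)
    (k : Nat) : ∀ (s : List Char), k ≤ s.length →
    (∀ i < k, ¬ ls <+: (PySem.Chars.lower s).drop i) →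
    hlB_loop s ls n color = s.take k ++ hlB_loop (s.drop k) ls n color := by
  induction k with
  | zero => intro s _ _; simp
  | succ k ih =>
    intro s hlen hmin
    match s with
    | [] => simp at hlen
    | c :: rest =>
      rw [hlB_loop, if_neg]
      · rw [ih rest (by simpa using hlen)]
        · simp
        · intro i hi
          have := hmin (i + 1) (by omega)
          simpa [PySem.Chars.lower, List.drop_succ_cons] using this
      · intro hc
        exact hmin 0 (by omega) (by simpa using (hlB_cond_iff _ _ _ hn).mp hc)

theorem hlB_match (s ls : List Char) (n : Nat) (color : List Char) (hn : ls.length = n)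
    (hpos : 1 ≤ n) (h : ls <+: PySem.Chars.lower s) :
    hlB_loop s ls n color =
      ('[' :: color ++ [']']) ++ s.take n ++ ('[' :: '/' :: color ++ [']'])
        ++ hlB_loop (s.drop n) ls n color := by
  match s with
  | [] =>
    exfalso
    have hnil : ls = [] := by
      simpa [PySem.Chars.lower] using h
    rw [hnil] at hn
    simp at hn
    omega
  | c :: rest =>
    rw [hlB_loop, if_pos ((hlB_cond_iff _ _ _ hn).mpr h)]
    have : rest.drop (n - 1) = (c :: rest).drop n := by
      cases n with
      | zero => omega
      | succ m => simp
    rw [this]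

theorem hlA_eq_hlB (t ls color : List Char) (n : Nat) (hn : ls.length = n) (hpos : 1 ≤ n) :
    ∀ (fuel pos : Nat), pos ≤ t.length → t.length + 1 - pos ≤ fuel →
    hlA_loop t (PySem.Chars.lower t) ls n color fuel pos =
      hlB_loop (t.drop pos) ls n color := by
  intro fuel
  induction fuel with
  | zero => intro pos hp hf; omega
  | succ fuel ih =>
    intro pos hp hf
    rw [hlA_loop]
    set idx := PySem.Chars.findFrom (PySem.Chars.lower t) ls (pos : Int) with hidx
    have hlenl : (PySem.Chars.lower t).length = t.length := length_lower t
    by_cases hneg : idx = -1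
    · rw [if_pos hneg]
      have hnin : ¬ ls <:+: (PySem.Chars.lower t).drop pos :=
        (PySem.Chars.findFrom_natCast_eq_neg_one_iff _ _ pos (by omega)).mp hneg
      rw [PySem.Chars.slice_eq_listSlice, PySem.List.slice_from_natCast]
      rw [hlB_nomatch _ _ _ _ hn (by rwa [lower_drop])]
    · rw [if_neg hneg]
      obtain ⟨hge, hpre, hmin⟩ :=
        PySem.Chars.findFrom_natCast_spec (PySem.Chars.lower t) ls pos (by omega) hneg
      rw [← hidx] at hge hpre hmin
      set j := idx.toNat with hj
      have hidxj : idx = (j : Int) := by omega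
      have hposj : pos ≤ j := by omega
      have hjn : j + n ≤ t.length := by
        have := hpre.length_le
        simp [hn, hlenl] at this
        omega
      -- left side slices
      rw [hidxj]
      simp only [PySem.Chars.slice_eq_listSlice]
      rw [PySem.List.slice_natCast, PySem.List.slice_natCast_add]
      -- right side: skip (j - pos) chars, then a match, then recurse
      rw [hlB_skip ls n color hn (j - pos) (t.drop pos) (by simp; omega)
        (by
          intro i hi
          rw [lower_drop, List.drop_drop]
          exact hmin (pos + i) (by omega) (by omega))]
      rw [List.drop_drop]
      have hjp : pos + (j - pos) = j := by omega
      rw [hjp]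
      rw [hlB_match (t.drop j) ls n color hn hpos (by rwa [lower_drop])]
      rw [List.drop_drop]
      rw [ih (j + n) (by omega) (by omega)]
      simp

-- ===== VERDICT (by name: the statement is the Claim_ definition above) =====
theorem highlight_text_spec : Claim_equal_highlight_text := by
  intro text search color _
  unfold Spec_highlight_text highlight_text highlight_text_alt
  by_cases hg : search = "" ∨ text = ""
  · rw [if_pos hg, if_pos hg]
  · rw [if_neg hg, if_neg hg]
    have hne : search.toList ≠ [] := by
      intro h
      exact hg (Or.inl (by
        have := congrArg String.ofList h
        simpa [String.ofList] using this))
    have hn : (PySem.Chars.lower search.toList).length = search.toList.length :=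
      length_lower _
    have hpos : 1 ≤ search.toList.length := by
      cases h : search.toList with
      | nil => exact absurd h hne
      | cons a l => simp
    congr 1
    have := hlA_eq_hlB text.toList (PySem.Chars.lower search.toList) color.toList
      search.toList.length hn hpos (text.toList.length + 1) 0 (by omega) (by omega)
    simpa using this
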